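-- pv_equiv track=rewrite | github.com/Aimnrl/AIM | Woodland Database/main.py | build_mock_graph
-- ===== SOURCE A (Python) =====
-- def build_mock_graph(rooms):
--     # For now, assume adjacent room IDs are connected (fake adjacency)
--     graph = {}
--     sorted_rooms = sorted(rooms, key=lambda r: r[2])  # room_number
--     for i in range(len(sorted_rooms) - 1):
--         a = sorted_rooms[i][0]  # room id
--         b = sorted_rooms[i + 1][0]
--         graph.setdefault(a, []).append((b, 1))
--         graph.setdefault(b, []).append((a, 1))
--     return graph
-- ===== SOURCE B (Python) =====
-- def build_mock_graph(rooms):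
--     # Group-by approach: index each room id by its positions in the sorted order,
--     # then emit every id's whole adjacency list at once from those positions.
--     ids = [r[0] for r in sorted(rooms, key=lambda r: r[2])]
--     n = len(ids)
--     if n < 2:
--         return {}  # a chain of fewer than two rooms has no edges
--     idx = {}
--     for j, rid in enumerate(ids):
--         idx.setdefault(rid, []).append(j)
--     return {rid: [(ids[k], 1) for j in js for k in (j - 1, j + 1) if 0 <= k < n]
--             for rid, js in idx.items()}
-- ===== Notes on version B (the rewrite author's own statement) =====
-- stated objective: alternative
-- what changed: Replaces A's incremental edge-centric dict building (two setdefault-appends per consecutive sorted pair) with a group-by: first build a positions index mapping each room id to its indices in the sorted order, then emit every id's complete adjacency list in one dict comprehension from those positions.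
import Mathlib
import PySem

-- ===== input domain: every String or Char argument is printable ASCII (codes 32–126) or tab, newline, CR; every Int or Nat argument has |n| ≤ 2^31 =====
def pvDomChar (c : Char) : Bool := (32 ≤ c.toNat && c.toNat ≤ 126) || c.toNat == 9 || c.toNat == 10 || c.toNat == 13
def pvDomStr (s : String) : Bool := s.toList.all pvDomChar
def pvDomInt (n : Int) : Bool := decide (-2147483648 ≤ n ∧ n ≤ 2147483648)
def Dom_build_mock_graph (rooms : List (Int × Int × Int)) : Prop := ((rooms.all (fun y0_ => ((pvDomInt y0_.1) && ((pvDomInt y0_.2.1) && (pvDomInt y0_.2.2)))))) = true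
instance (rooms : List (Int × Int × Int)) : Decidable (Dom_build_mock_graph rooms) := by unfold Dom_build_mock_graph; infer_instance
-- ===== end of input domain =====

-- B replaces A's incremental edge-centric dict building by a group-by: a positions
-- index (id -> indices in sorted order) built first, then each id's whole adjacency
-- list emitted at once from those positions ('alternative', same cost).

-- ===== PORT A =====
-- graph.setdefault(a, []).append((b, 1)) is d.modify a [] (· ++ [(b, 1)]) (insert-at-end on a
-- missing key, append in place on a present one — exactly Python's setdefault+append).
def build_mock_graph (rooms : List (Int × Int × Int)) : List (Int × List (Int × Int)) :=
  let sorted_rooms := PySem.List.sorted rooms (fun r => r.2.2)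
  let graph : PySem.Dict Int (List (Int × Int)) :=
    (PySem.List.pyRange 0 ((sorted_rooms.length : Int) - 1) 1).foldl
      (fun graph i =>
        let a := (PySem.List.pyGetD sorted_rooms i (0, 0, 0)).1
        let b := (PySem.List.pyGetD sorted_rooms (i + 1) (0, 0, 0)).1
        (graph.modify a [] (· ++ [(b, 1)])).modify b [] (· ++ [(a, 1)]))
      PySem.Dict.empty
  graph.items

-- ===== PORT B =====
-- idx.setdefault(rid, []).append(j) is d.modify rid [] (· ++ [j]); the final dict
-- comprehension over idx.items() is a map over the items list (its keys are distinct).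
def build_mock_graph_alt (rooms : List (Int × Int × Int)) : List (Int × List (Int × Int)) :=
  let ids := (PySem.List.sorted rooms (fun r => r.2.2)).map (fun r => r.1)
  let n : Int := (ids.length : Int)
  if ids.length < 2 then []
  else
    let idx : PySem.Dict Int (List Int) :=
      (PySem.List.enumerate ids 0).foldl (fun d p => d.modify p.2 [] (· ++ [p.1])) PySem.Dict.empty
    idx.items.map (fun q =>
      (q.1, q.2.flatMap (fun j =>
        ([j - 1, j + 1].filter (fun k => decide (0 ≤ k) && decide (k < n))).map
          (fun k => (PySem.List.pyGetD ids k 0, 1)))))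

-- ===== PRECONDITION & SPEC =====
def Spec_build_mock_graph (rooms : List (Int × Int × Int)) (out : List (Int × List (Int × Int))) : Prop := out = build_mock_graph_alt rooms
instance (rooms : List (Int × Int × Int)) (out : List (Int × List (Int × Int))) : Decidable (Spec_build_mock_graph rooms out) := by unfold Spec_build_mock_graph; infer_instance

-- ===== CLAIM (what is proved, stated in full; the proofs are below) =====
def Claim_equal_build_mock_graph : Prop := ∀ (rooms : List (Int × Int × Int)), Dom_build_mock_graph rooms → Spec_build_mock_graph rooms (build_mock_graph rooms)

-- ===== LEMMAS AND PROOFS =====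

-- A's edge step, over room ids.
def pvStepA (g : PySem.Dict Int (List (Int × Int))) (p : Int × Int) : PySem.Dict Int (List (Int × Int)) :=
  (g.modify p.1 [] (· ++ [(p.2, 1)])).modify p.2 [] (· ++ [(p.1, 1)])

-- A's appended (key, entry) pairs, one list per consecutive edge, flattened.
def pvEdgeFlat (I : List Int) : List (Int × (Int × Int)) :=
  (I.zip I.tail).flatMap (fun e => [(e.1, (e.2, 1)), (e.2, (e.1, 1))])

-- B's per-position contribution: the (neighbour id, 1) entries of position j.
def pvContrib (I : List Int) (j : Int) : List (Int × Int) :=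
  ([j - 1, j + 1].filter (fun k => decide (0 ≤ k) && decide (k < (I.length : Int)))).map
    (fun k => (PySem.List.pyGetD I k 0, 1))

-- B's per-position (key, entry) pairs, for an enumerate element q = (index, id).
def pvPosB (I : List Int) (q : Int × Int) : List (Int × (Int × Int)) :=
  (pvContrib I q.1).map (fun v => (q.2, v))

-- A's index fold over the sorted rooms is the edge fold over the id list.
theorem pv_A_fold_eq (s : List (Int × Int × Int)) :
    (PySem.List.pyRange 0 ((s.length : Int) - 1) 1).foldl
      (fun graph i =>
        let a := (PySem.List.pyGetD s i (0, 0, 0)).1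
        let b := (PySem.List.pyGetD s (i + 1) (0, 0, 0)).1
        (graph.modify a [] (· ++ [(b, 1)])).modify b [] (· ++ [(a, 1)]))
      PySem.Dict.empty
    = ((s.map (fun r => r.1)).zip (s.map (fun r => r.1)).tail).foldl pvStepA PySem.Dict.empty := by
  have hmap : (PySem.List.pyRange 0 ((s.length : Int) - 1) 1).map
      (fun i => ((PySem.List.pyGetD s i (0, 0, 0)).1, (PySem.List.pyGetD s (i + 1) (0, 0, 0)).1))
      = ((s.map (fun r => r.1)).zip (s.map (fun r => r.1)).tail) := by
    cases s with
    | nil =>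
      rw [PySem.List.pyRange_one_eq_nil (by simp)]
      rfl
    | cons r0 rs =>
      apply List.ext_getElem
      · simp [PySem.List.length_pyRange_one]
      · intro j h1 h2
        have hlen : ((((r0 :: rs).length : Int) - 1) - 0).toNat = rs.length := by
          simp
        have hj : j < rs.length := by
          simpa [PySem.List.length_pyRange_one, hlen] using h1
        simp only [List.getElem_map, PySem.List.getElem_pyRange_one, zero_add]
        have hj1 : ((j : Int) + 1) = ((j + 1 : Nat) : Int) := by push_cast; ring
        rw [hj1, PySem.List.pyGetD_natCast, PySem.List.pyGetD_natCast]
        simp only [List.getElem_zip, List.getElem_map, List.getElem_tail]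
        rw [List.getD_eq_getElem _ _ (by simp; omega), List.getD_eq_getElem _ _ (by simp; omega)]
  calc (PySem.List.pyRange 0 ((s.length : Int) - 1) 1).foldl
        (fun graph i =>
          let a := (PySem.List.pyGetD s i (0, 0, 0)).1
          let b := (PySem.List.pyGetD s (i + 1) (0, 0, 0)).1
          (graph.modify a [] (· ++ [(b, 1)])).modify b [] (· ++ [(a, 1)]))
        PySem.Dict.empty
      = ((PySem.List.pyRange 0 ((s.length : Int) - 1) 1).map
          (fun i => ((PySem.List.pyGetD s i (0, 0, 0)).1, (PySem.List.pyGetD s (i + 1) (0, 0, 0)).1))).foldl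
          pvStepA PySem.Dict.empty := by
        rw [List.foldl_map]
        rfl
    _ = _ := by rw [hmap]

-- The edge fold (two modifies per edge) is the single-modify fold over pvEdgeFlat.
theorem pv_two_one (E : List (Int × Int)) (d : PySem.Dict Int (List (Int × Int))) :
    E.foldl pvStepA d
      = (E.flatMap (fun e => [(e.1, (e.2, 1)), (e.2, (e.1, 1))])).foldl
          (fun d p => d.modify p.1 [] (· ++ [p.2])) d := by
  induction E generalizing d with
  | nil => rfl
  | cons e t ih => simp only [List.foldl_cons, List.flatMap_cons, List.foldl_append]; exact ih _

-- A modify-append fold from the empty dict groups its pair list by key.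
theorem pv_items_groupfold {ν : Type} (L : List (Int × ν)) :
    ((L.foldl (fun d p => d.modify p.1 [] (· ++ [p.2])) (PySem.Dict.empty : PySem.Dict Int (List ν))).items)
      = (PySem.Set.ofList (L.map Prod.fst)).map
          (fun k => (k, (L.filter (fun p => p.1 == k)).map (·.2))) := by
  have hnd : ((L.foldl (fun d p => d.modify p.1 [] (· ++ [p.2]))
      (PySem.Dict.empty : PySem.Dict Int (List ν))).keys).Nodup :=
    PySem.Dict.nodup_keys_foldl_modify_key _ _ _ _ _ PySem.Dict.nodup_keys_empty
  have hkeys : ((L.foldl (fun d p => d.modify p.1 [] (· ++ [p.2]))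
      (PySem.Dict.empty : PySem.Dict Int (List ν))).keys) = PySem.Set.ofList (L.map Prod.fst) := by
    rw [PySem.Dict.keys_foldl_modify_key]
    simp [PySem.Set.update_nil_left]
  rw [PySem.Dict.items_eq_map_keys _ hnd ([] : List ν), hkeys]
  apply List.map_congr_left
  intro k _
  rw [PySem.Dict.getD_foldl_modify_append]
  simp

-- Splitting and evaluating filters of two-element literal lists.
theorem pv_filter_pair (p : Int → Bool) (a b : Int) :
    List.filter p [a, b] = List.filter p [a] ++ List.filter p [b] := by
  cases hpa : p a <;> cases hpb : p b <;> simp [hpa, hpb]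

theorem pv_filter_one_pos (p : Int → Bool) (a : Int) (h : p a = true) :
    List.filter p [a] = [a] := by
  simp [h]

theorem pv_filter_one_neg (p : Int → Bool) (a : Int) (h : p a = false) :
    List.filter p [a] = [] := by
  simp [h]

-- Interleave identity, generalized over the suffix: the prev-entry of the suffix's head
-- plus the suffix's edge pairs equal the per-position pairs of the enumerated suffix.
theorem pv_interleave_aux (I : List Int) (t : List Int) (x : Int) (j : Nat)
    (h : I.drop j = x :: t) :
    ([(j : Int) - 1].filter (fun k => decide (0 ≤ k) && decide (k < (I.length : Int)))).map
        (fun k => (x, (PySem.List.pyGetD I k 0, 1)))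
      ++ pvEdgeFlat (x :: t)
      = (PySem.List.enumerate (x :: t) (j : Int)).flatMap (pvPosB I) := by
  induction t generalizing x j with
  | nil =>
    have hj : j + 1 = I.length := by
      have hlen := congrArg List.length h
      simp [List.length_drop] at hlen
      omega
    have hnext : (decide (0 ≤ (j : Int) + 1) && decide ((j : Int) + 1 < (I.length : Int))) = false := by
      simp only [Bool.and_eq_false_iff, decide_eq_false_iff_not, not_lt]
      right
      omega
    rw [show pvEdgeFlat [x] = [] from rfl, List.append_nil,
      PySem.List.enumerate_cons, PySem.List.enumerate_nil, List.flatMap_cons, List.flatMap_nil,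
      List.append_nil]
    simp only [pvPosB, pvContrib]
    rw [pv_filter_pair, pv_filter_one_neg _ ((j : Int) + 1) hnext, List.append_nil, List.map_map]
    rfl
  | cons y t' ih =>
    have hlen2 : j + 2 ≤ I.length := by
      have hlen := congrArg List.length h
      simp [List.length_drop] at hlen
      omega
    have hdrop' : I.drop (j + 1) = y :: t' := by
      have hdd : (I.drop j).drop 1 = I.drop (j + 1) := by
        rw [List.drop_drop]
      rw [← hdd, h]
      rfl
    have hgetx : PySem.List.pyGetD I (j : Int) 0 = x := by
      have hx : I[j]? = some x := by
        have h0 : (I.drop j)[0]? = some x := by rw [h]; rfl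
        rwa [List.getElem?_drop, Nat.add_zero] at h0
      rw [PySem.List.pyGetD_natCast, List.getD_eq_getElem?_getD, hx]
      rfl
    have hgety : PySem.List.pyGetD I ((j : Int) + 1) 0 = y := by
      have hy : I[j + 1]? = some y := by
        have h0 : (I.drop (j + 1))[0]? = some y := by rw [hdrop']; rfl
        rwa [List.getElem?_drop, Nat.add_zero] at h0
      have hc : ((j : Int) + 1) = ((j + 1 : Nat) : Int) := by push_cast; ring
      rw [hc, PySem.List.pyGetD_natCast, List.getD_eq_getElem?_getD, hy]
      rfl
    have hnext : (decide (0 ≤ (j : Int) + 1) && decide ((j : Int) + 1 < (I.length : Int))) = true := by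
      simp only [Bool.and_eq_true, decide_eq_true_eq]
      exact ⟨by omega, by exact_mod_cast (by omega : (j : Int) + 1 < (I.length : Int))⟩
    have hprev : (decide (0 ≤ (j : Int)) && decide ((j : Int) < (I.length : Int))) = true := by
      simp only [Bool.and_eq_true, decide_eq_true_eq]
      exact ⟨by omega, by exact_mod_cast (by omega : (j : Int) < (I.length : Int))⟩
    have hih := ih y (j + 1) hdrop'
    have hcast : ((j + 1 : Nat) : Int) = (j : Int) + 1 := by push_cast; ring
    have e1 : (j : Int) + 1 - 1 = (j : Int) := by ring
    rw [hcast, e1, pv_filter_one_pos _ _ hprev] at hih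
    have hEdge : pvEdgeFlat (x :: y :: t')
        = (x, (y, 1)) :: (y, (x, 1)) :: pvEdgeFlat (y :: t') := rfl
    have hPos : pvPosB I ((j : Int), x)
        = ([(j : Int) - 1].filter (fun k => decide (0 ≤ k) && decide (k < (I.length : Int)))).map
            (fun k => (x, (PySem.List.pyGetD I k 0, 1))) ++ [(x, (y, 1))] := by
      simp only [pvPosB, pvContrib]
      rw [pv_filter_pair, pv_filter_one_pos _ ((j : Int) + 1) hnext, List.map_append, List.map_append,
        List.map_map, List.map_map]
      congr 1
      show [(x, (PySem.List.pyGetD I ((j : Int) + 1) 0, 1))] = [(x, (y, 1))]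
      rw [hgety]
    rw [PySem.List.enumerate_cons, List.flatMap_cons, hPos, hEdge, ← hih]
    simp [hgetx]

-- The edge-centric pair list equals the position-centric pair list.
theorem pv_interleave (I : List Int) :
    pvEdgeFlat I = (PySem.List.enumerate I 0).flatMap (pvPosB I) := by
  cases I with
  | nil => rfl
  | cons x t =>
    have h := pv_interleave_aux (x :: t) t x 0 (by rfl)
    have hfalse : (decide (0 ≤ (0 : Int) - 1) && decide ((0 : Int) - 1 < (((x :: t).length : Nat) : Int))) = false := by
      norm_num
    rw [pv_filter_one_neg _ _ hfalse] at h
    simpa using h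

-- Filtering the position-centric pairs by key and dropping keys is the
-- flatMap of the contributions of that key's positions.
theorem pv_filter_flat (h : Int → List (Int × Int)) (E : List (Int × Int)) (k : Int) :
    ((E.flatMap (fun q => (h q.1).map (fun v => (q.2, v)))).filter (fun p => p.1 == k)).map (·.2)
      = ((E.filter (fun q => q.2 == k)).map (·.1)).flatMap h := by
  induction E with
  | nil => rfl
  | cons q E' ih =>
    simp only [List.flatMap_cons, List.filter_append, List.map_append, List.filter_cons]
    by_cases hq : q.2 == k
    · have hblock : (((h q.1).map (fun v => (q.2, v))).filter (fun p => p.1 == k)).map (·.2) = h q.1 := by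
        rw [List.filter_map]
        simp [Function.comp_def, hq, List.map_map]
      simp [hq, hblock, ih]
    · have hblock : (((h q.1).map (fun v => (q.2, v))).filter (fun p => p.1 == k)) = [] := by
        rw [List.filter_map]
        simp [Function.comp_def, hq]
      simp [hq, hblock, ih]

-- With every block nonempty, the keys of the flattened pairs dedup to the base keys.
theorem pv_keys_flat (h : Int → List (Int × Int)) (E : List (Int × Int))
    (hne : ∀ q ∈ E, h q.1 ≠ []) (s : PySem.Set Int) :
    PySem.Set.update s ((E.flatMap (fun q => (h q.1).map (fun v => (q.2, v)))).map Prod.fst)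
      = PySem.Set.update s (E.map (·.2)) := by
  induction E generalizing s with
  | nil => rfl
  | cons q E' ih =>
    simp only [List.flatMap_cons, List.map_append, List.map_cons, PySem.Set.update_append,
      PySem.Set.update_cons]
    have hfst : ((h q.1).map (fun v => (q.2, v))).map Prod.fst
        = List.replicate (h q.1).length q.2 := by
      simp [List.map_map, Function.comp_def, List.map_const']
    rw [hfst]
    obtain ⟨c, cs, hcs⟩ := List.exists_cons_of_ne_nil (hne q (by simp))
    rw [hcs]
    have hrep : PySem.Set.update s (List.replicate (c :: cs).length q.2) = PySem.Set.add s q.2 := by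
      clear hcs
      induction cs generalizing s with
      | nil => rfl
      | cons c' cs' ih2 =>
        have : (c :: c' :: cs').length = 1 + (c :: cs').length := by simp; omega
        rw [this, List.replicate_add]
        simp only [PySem.Set.update_append, List.replicate_one, PySem.Set.update_cons,
          PySem.Set.update_nil]
        rw [ih2]
        exact PySem.Set.add_of_mem (by rw [PySem.Set.mem_add]; right; rfl)
    rw [hrep]
    exact ih (hne := fun q hq => hne q (by simp [hq])) _

-- With at least two rooms every position contributes at least one entry.
theorem pv_contrib_ne (I : List Int) (h2 : 2 ≤ I.length) :
    ∀ q ∈ PySem.List.enumerate I 0, pvContrib I q.1 ≠ [] := by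
  intro q hq
  rw [PySem.List.mem_enumerate_iff] at hq
  obtain ⟨k, hk, rfl⟩ := hq
  intro hc
  rw [pvContrib, List.map_eq_nil_iff, List.filter_eq_nil_iff] at hc
  have h1 := hc ((0 + (k : Int)) - 1) (by simp)
  have h2' := hc ((0 + (k : Int)) + 1) (by simp)
  simp only [Bool.and_eq_true, decide_eq_true_eq, not_and, not_lt] at h1 h2'
  by_cases hk0 : k = 0
  · subst hk0
    have := h2' (by norm_num)
    omega
  · have hk1 : (0 : Int) ≤ 0 + (k : Int) - 1 := by omega
    have := h1 hk1
    omega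

-- ===== VERDICT (by name: the statement is the Claim_ definition above) =====
-- Assembled equality for a fixed id list (used on the sorted ids).
theorem pv_main (I : List Int) :
    (((I.zip I.tail).foldl pvStepA PySem.Dict.empty).items)
      = (if I.length < 2 then []
         else ((PySem.List.enumerate I 0).foldl (fun d p => d.modify p.2 [] (· ++ [p.1]))
            (PySem.Dict.empty : PySem.Dict Int (List Int))).items.map (fun q =>
          (q.1, q.2.flatMap (fun j =>
            ([j - 1, j + 1].filter (fun k => decide (0 ≤ k) && decide (k < (I.length : Int)))).map
              (fun k => (PySem.List.pyGetD I k 0, 1)))))) := by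
  by_cases hlen : I.length < 2
  · rw [if_pos hlen]
    match I, hlen with
    | [], _ => rfl
    | [x], _ => rfl
  · rw [if_neg hlen]
    have h2 : 2 ≤ I.length := by omega
    -- A side: group the flattened (key, entry) pairs.
    rw [pv_two_one]
    have hA := pv_items_groupfold (ν := Int × Int)
      ((I.zip I.tail).flatMap (fun e => [(e.1, (e.2, 1)), (e.2, (e.1, 1))]))
    rw [hA]
    have hflat : (I.zip I.tail).flatMap (fun e => [(e.1, (e.2, 1)), (e.2, (e.1, 1))])
        = (PySem.List.enumerate I 0).flatMap (fun q => (pvContrib I q.1).map (fun v => (q.2, v))) := by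
      have := pv_interleave I
      simpa [pvEdgeFlat, pvPosB] using this
    rw [hflat]
    -- B side: rewrite the index fold as a modify-append fold over swapped pairs and group it.
    have hBfold : (PySem.List.enumerate I 0).foldl (fun d p => d.modify p.2 [] (· ++ [p.1]))
        (PySem.Dict.empty : PySem.Dict Int (List Int))
        = ((PySem.List.enumerate I 0).map (fun p => (p.2, p.1))).foldl
            (fun d p => d.modify p.1 [] (· ++ [p.2])) PySem.Dict.empty := by
      rw [List.foldl_map]
    rw [hBfold, pv_items_groupfold]
    have hfst : ((PySem.List.enumerate I 0).map (fun p => (p.2, p.1))).map Prod.fst = I := by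
      rw [List.map_map]
      exact PySem.List.map_snd_enumerate I 0
    rw [hfst]
    -- keys: nonempty blocks keep first-occurrence order.
    have hkeys : PySem.Set.ofList
        (((PySem.List.enumerate I 0).flatMap
            (fun q => (pvContrib I q.1).map (fun v => (q.2, v)))).map Prod.fst)
        = PySem.Set.ofList I := by
      have h1 := pv_keys_flat (pvContrib I) (PySem.List.enumerate I 0) (pv_contrib_ne I h2) []
      rw [PySem.Set.update_nil_left, PySem.Set.update_nil_left] at h1
      rw [h1]
      congr 1
      exact PySem.List.map_snd_enumerate I 0
    rw [hkeys, List.map_map]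
    apply List.map_congr_left
    intro k _
    have hval := pv_filter_flat (pvContrib I) (PySem.List.enumerate I 0) k
    simp only [Function.comp_def]
    rw [hval]
    have hfilt : (((PySem.List.enumerate I 0).map (fun p => (p.2, p.1))).filter (fun p => p.1 == k))
        = ((PySem.List.enumerate I 0).filter (fun q => q.2 == k)).map (fun p => (p.2, p.1)) := by
      rw [List.filter_map]
      rfl
    rw [hfilt, List.map_map]
    rfl

-- ===== VERDICT, real =====
theorem build_mock_graph_spec : Claim_equal_build_mock_graph := by
  intro rooms _
  show build_mock_graph rooms = build_mock_graph_alt rooms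
  simp only [build_mock_graph, build_mock_graph_alt]
  rw [pv_A_fold_eq]
  exact pv_main ((PySem.List.sorted rooms (fun r => r.2.2)).map (fun r => r.1))
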